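-- pv_equiv track=rewrite | github.com/bruhmoment03/changhua-restaurant-scraper | modules/dataset_export.py | _followup_priority_rank
-- ===== SOURCE A (Python) =====
-- _TARGET_FOLLOWUP_REASON_ORDER = (
--     "missing_from_db",
--     "present_zero_reviews",
--     "exhausted_under_threshold",
--     "under_min_reviews",
--     "validation_issue",
--     "missing_discovery_lineage",
--     "missing_validation_lineage",
--     "missing_last_scraped",
--     "missing_coordinates",
-- )
--
-- def _followup_priority_rank(followup_reasons: str) -> int:
--     active_values = {
--         value.strip()
--         for value in str(followup_reasons or "").split("|")
--         if value.strip()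
--     }
--     for index, reason in enumerate(_TARGET_FOLLOWUP_REASON_ORDER, start=1):
--         if reason in active_values:
--             return index
--     return 0
-- ===== SOURCE B (Python) =====
-- _TARGET_FOLLOWUP_REASON_ORDER = (
--     "missing_from_db",
--     "present_zero_reviews",
--     "exhausted_under_threshold",
--     "under_min_reviews",
--     "validation_issue",
--     "missing_discovery_lineage",
--     "missing_validation_lineage",
--     "missing_last_scraped",
--     "missing_coordinates",
-- )
--
-- _RANK = {reason: i for i, reason in enumerate(_TARGET_FOLLOWUP_REASON_ORDER, start=1)}
--
--
-- def _followup_priority_rank(followup_reasons: str) -> int: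
--     active_values = set(
--         filter(None, (value.strip() for value in str(followup_reasons or "").split("|")))
--     )
--     ranks = [_RANK[value] for value in active_values if value in _RANK]
--     return min(ranks) if ranks else 0
-- ===== Notes on version B (the rewrite author's own statement) =====
-- stated objective: idiomatic
-- what changed: Instead of scanning the fixed priority tuple for the first reason contained in the active set, B precomputes a reason-to-rank dict once and minimizes the ranks of the active values themselves (min of table lookups, 0 when none match), reversing the traversal direction.
import Mathlib
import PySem

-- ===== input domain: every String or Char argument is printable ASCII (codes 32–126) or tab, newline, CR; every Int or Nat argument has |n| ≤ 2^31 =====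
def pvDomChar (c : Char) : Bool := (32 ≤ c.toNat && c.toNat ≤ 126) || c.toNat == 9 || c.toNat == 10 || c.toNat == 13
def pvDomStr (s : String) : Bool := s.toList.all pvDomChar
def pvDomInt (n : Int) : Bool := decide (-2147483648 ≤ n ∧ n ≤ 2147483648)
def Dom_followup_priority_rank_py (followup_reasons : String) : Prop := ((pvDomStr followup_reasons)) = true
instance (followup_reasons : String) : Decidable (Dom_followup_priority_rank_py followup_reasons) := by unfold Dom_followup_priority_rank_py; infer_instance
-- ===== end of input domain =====

-- B replaces A's first-match scan over the fixed priority tuple by a rank-table lookup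
-- minimized over the active values themselves (objective: idiomatic; same cost).

-- ===== PORT A =====

-- _TARGET_FOLLOWUP_REASON_ORDER
def pvOrder : List String :=
  ["missing_from_db", "present_zero_reviews", "exhausted_under_threshold",
   "under_min_reviews", "validation_issue", "missing_discovery_lineage",
   "missing_validation_lineage", "missing_last_scraped", "missing_coordinates"]

-- the set comprehension {value.strip() for value in str(followup_reasons or "").split("|") if value.strip()}
-- (identical line in A and in B, so shared by both ports)
def pvActive (followup_reasons : String) : PySem.Set String :=
  PySem.Set.ofList
    ((((PySem.Str.split? (if followup_reasons = "" then "" else followup_reasons) "|").getD []).map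
        PySem.Str.strip).filter (fun v => v ≠ ""))

-- 'for index, reason in enumerate(_TARGET_FOLLOWUP_REASON_ORDER, start=1): if reason in active_values: return index' / 'return 0'
def pvLoopA (act : PySem.Set String) : Int → List String → Int
  | _, [] => 0
  | i, r :: rest => if PySem.Set.contains act r then i else pvLoopA act (i + 1) rest

def followup_priority_rank_py (followup_reasons : String) : Int :=
  pvLoopA (pvActive followup_reasons) 1 pvOrder

-- ===== PORT B =====

-- _RANK = {reason: i for i, reason in enumerate(_TARGET_FOLLOWUP_REASON_ORDER, start=1)}
def pvRank : PySem.Dict String Int :=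
  PySem.Dict.ofList
    [("missing_from_db", 1), ("present_zero_reviews", 2), ("exhausted_under_threshold", 3),
     ("under_min_reviews", 4), ("validation_issue", 5), ("missing_discovery_lineage", 6),
     ("missing_validation_lineage", 7), ("missing_last_scraped", 8), ("missing_coordinates", 9)]

-- ranks = [_RANK[value] for value in active_values if value in _RANK]; min(ranks) if ranks else 0
-- (min over the active set is order-independent, so iterating the Set's list is exact)
def followup_priority_rank_py_alt (followup_reasons : String) : Int :=
  let active := pvActive followup_reasons
  let ranks := (active.filter (fun v => PySem.Dict.contains pvRank v)).map
      (fun v => PySem.Dict.getD pvRank v 0)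
  match PySem.List.min? ranks (fun x => x) with
  | some m => m
  | none => 0

-- ===== PRECONDITION & SPEC =====

def Spec_followup_priority_rank_py (followup_reasons : String) (out : Int) : Prop := out = followup_priority_rank_py_alt followup_reasons
instance (followup_reasons : String) (out : Int) : Decidable (Spec_followup_priority_rank_py followup_reasons out) := by unfold Spec_followup_priority_rank_py; infer_instance

-- ===== CLAIM (what is proved, stated in full; the proofs are below) =====
def Claim_equal_followup_priority_rank_py : Prop := ∀ (followup_reasons : String), Dom_followup_priority_rank_py followup_reasons → Spec_followup_priority_rank_py followup_reasons (followup_priority_rank_py followup_reasons)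

-- ===== LEMMAS AND PROOFS =====

-- the list of ranks B's comprehension builds, as a function of the active set
def ranksOf (act : List String) : List Int :=
  (act.filter (fun v => PySem.Dict.contains pvRank v)).map (fun v => PySem.Dict.getD pvRank v 0)

lemma contains_pvRank (v : String) : PySem.Dict.contains pvRank v = true ↔
    (v = "missing_from_db" ∨ v = "present_zero_reviews" ∨ v = "exhausted_under_threshold" ∨
     v = "under_min_reviews" ∨ v = "validation_issue" ∨ v = "missing_discovery_lineage" ∨
     v = "missing_validation_lineage" ∨ v = "missing_last_scraped" ∨ v = "missing_coordinates") := by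
  have hi : pvRank.items =
    [("missing_from_db", (1:Int)), ("present_zero_reviews", 2), ("exhausted_under_threshold", 3),
     ("under_min_reviews", 4), ("validation_issue", 5), ("missing_discovery_lineage", 6),
     ("missing_validation_lineage", 7), ("missing_last_scraped", 8), ("missing_coordinates", 9)] := by decide
  simp only [PySem.Dict.contains, hi, List.any_cons, List.any_nil, Bool.or_false,
    Bool.or_eq_true, beq_iff_eq]
  constructor
  · rintro (h|h|h|h|h|h|h|h|h) <;> simp [h]
  · rintro (h|h|h|h|h|h|h|h|h) <;> simp [h]

lemma pvGetD1 : pvRank.getD "missing_from_db" 0 = 1 := by decide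
lemma pvGetD2 : pvRank.getD "present_zero_reviews" 0 = 2 := by decide
lemma pvGetD3 : pvRank.getD "exhausted_under_threshold" 0 = 3 := by decide
lemma pvGetD4 : pvRank.getD "under_min_reviews" 0 = 4 := by decide
lemma pvGetD5 : pvRank.getD "validation_issue" 0 = 5 := by decide
lemma pvGetD6 : pvRank.getD "missing_discovery_lineage" 0 = 6 := by decide
lemma pvGetD7 : pvRank.getD "missing_validation_lineage" 0 = 7 := by decide
lemma pvGetD8 : pvRank.getD "missing_last_scraped" 0 = 8 := by decide
lemma pvGetD9 : pvRank.getD "missing_coordinates" 0 = 9 := by decide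

lemma mem_ranksOf (act : List String) (y : Int) : y ∈ ranksOf act ↔
    (("missing_from_db" ∈ act ∧ y = 1) ∨ ("present_zero_reviews" ∈ act ∧ y = 2) ∨
     ("exhausted_under_threshold" ∈ act ∧ y = 3) ∨ ("under_min_reviews" ∈ act ∧ y = 4) ∨
     ("validation_issue" ∈ act ∧ y = 5) ∨ ("missing_discovery_lineage" ∈ act ∧ y = 6) ∨
     ("missing_validation_lineage" ∈ act ∧ y = 7) ∨ ("missing_last_scraped" ∈ act ∧ y = 8) ∨
     ("missing_coordinates" ∈ act ∧ y = 9)) := by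
  simp only [ranksOf, List.mem_map, List.mem_filter]
  constructor
  · rintro ⟨v, ⟨hv, hc⟩, rfl⟩
    rcases (contains_pvRank v).mp hc with rfl|rfl|rfl|rfl|rfl|rfl|rfl|rfl|rfl <;>
      simp [hv, pvGetD1, pvGetD2, pvGetD3, pvGetD4, pvGetD5, pvGetD6, pvGetD7, pvGetD8, pvGetD9]
  · rintro (⟨h, rfl⟩|⟨h, rfl⟩|⟨h, rfl⟩|⟨h, rfl⟩|⟨h, rfl⟩|⟨h, rfl⟩|⟨h, rfl⟩|⟨h, rfl⟩|⟨h, rfl⟩)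
    · exact ⟨_, ⟨h, by decide⟩, pvGetD1⟩
    · exact ⟨_, ⟨h, by decide⟩, pvGetD2⟩
    · exact ⟨_, ⟨h, by decide⟩, pvGetD3⟩
    · exact ⟨_, ⟨h, by decide⟩, pvGetD4⟩
    · exact ⟨_, ⟨h, by decide⟩, pvGetD5⟩
    · exact ⟨_, ⟨h, by decide⟩, pvGetD6⟩
    · exact ⟨_, ⟨h, by decide⟩, pvGetD7⟩
    · exact ⟨_, ⟨h, by decide⟩, pvGetD8⟩
    · exact ⟨_, ⟨h, by decide⟩, pvGetD9⟩

-- A's loop either finds nothing (and no active value has a rank), or returns a member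
-- of B's rank list that is a lower bound of it
lemma loop_char (act : List String) :
    (pvLoopA act 1 pvOrder = 0 ∧ ∀ y, y ∉ ranksOf act) ∨
    (pvLoopA act 1 pvOrder ∈ ranksOf act ∧ ∀ y ∈ ranksOf act, pvLoopA act 1 pvOrder ≤ y) := by
  simp only [pvOrder, pvLoopA]
  split_ifs with h1 h2 h3 h4 h5 h6 h7 h8 h9 <;>
    [skip; skip; skip; skip; skip; skip; skip; skip; skip;
     (left; refine ⟨rfl, fun y hy => ?_⟩;
      rw [mem_ranksOf] at hy;
      simp only [← PySem.Set.contains_iff] at hy;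
      rcases hy with ⟨h,_⟩|⟨h,_⟩|⟨h,_⟩|⟨h,_⟩|⟨h,_⟩|⟨h,_⟩|⟨h,_⟩|⟨h,_⟩|⟨h,_⟩ <;> simp_all)] <;>
  · right
    constructor
    · rw [mem_ranksOf]
      simp only [← PySem.Set.contains_iff]
      simp_all
    · intro y hy
      rw [mem_ranksOf] at hy
      simp only [← PySem.Set.contains_iff] at hy
      rcases hy with ⟨h,rfl⟩|⟨h,rfl⟩|⟨h,rfl⟩|⟨h,rfl⟩|⟨h,rfl⟩|⟨h,rfl⟩|⟨h,rfl⟩|⟨h,rfl⟩|⟨h,rfl⟩ <;>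
        simp_all

-- first hit of the ascending scan = minimum of the collected ranks (0 when none)
lemma core_eq (act : List String) :
    pvLoopA act 1 pvOrder =
      (match PySem.List.min? (ranksOf act) (fun x => x) with
       | some m => m
       | none => 0) := by
  rcases loop_char act with ⟨h0, hnone⟩ | ⟨hmem, hmin⟩
  · have he : ranksOf act = [] := by
      cases h : ranksOf act with
      | nil => rfl
      | cons a t => exact absurd (h ▸ List.mem_cons_self) (hnone a)
    rw [he, h0]
    simp [(PySem.List.min?_eq_none_iff ([] : List Int) (fun x => x)).mpr rfl]
  · cases h : PySem.List.min? (ranksOf act) (fun x => x) with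
    | none =>
        exact absurd ((PySem.List.min?_eq_none_iff _ _).mp h ▸ hmem) (List.not_mem_nil)
    | some m =>
        exact le_antisymm (hmin m (PySem.List.min?_mem h)) (PySem.List.min?_isMin h _ hmem)

-- ===== VERDICT (by name: the statement is the Claim_ definition above) =====
theorem followup_priority_rank_py_spec : Claim_equal_followup_priority_rank_py := by
  intro s _
  unfold Spec_followup_priority_rank_py followup_priority_rank_py followup_priority_rank_py_alt
  exact core_eq (pvActive s)
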